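-- pv_equiv track=rewrite | github.com/OmniNode-ai/omnibase_core | src/omnibase_core/mixins/mixin_canonical_serialization.py | _strip_comment_prefix
-- ===== SOURCE A (Python) =====
-- def _strip_comment_prefix(
--     block: str,
--     comment_prefixes: tuple[str, ...] = ("# ", "#"),
-- ) -> str:
--     """
--     Remove leading comment prefixes from each line of a block.
--     Args:
--         block: Multiline string block to process.
--         comment_prefixes: Tuple/list[Any]of prefix strings to remove from line starts.
--     Returns:
--         Block with comment prefixes removed from each line.
--     """
--     lines = block.splitlines()
--
--     def _strip_line(line: str) -> str:
--         for prefix in comment_prefixes: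
--             if line.lstrip().startswith(prefix):
--                 # Remove only one prefix per line, after optional leading whitespace
--                 i = line.find(prefix)
--                 return line[:i] + line[i + len(prefix) :]
--         return line
--
--     return "\n".join(_strip_line(line) for line in lines)
-- ===== SOURCE B (Python) =====
-- def _strip_comment_prefix(
--     block: str,
--     comment_prefixes: tuple[str, ...] = ("# ", "#"),
-- ) -> str:
--     """Single left-to-right scan over the raw block (no per-line splitting):
--     copy leading whitespace, drop at most one comment prefix, copy the rest of
--     the line, normalise the terminator to '\\n'."""
--     # a prefix containing a line break can never occur inside one line
--     cand = [p for p in comment_prefixes if "\n" not in p and "\r" not in p]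
--     out = []
--     n = len(block)
--     i = 0
--     while i < n:
--         # leading whitespace of this line
--         while i < n and block[i] not in "\r\n" and block[i].isspace():
--             out.append(block[i])
--             i += 1
--         # drop at most one comment prefix
--         for p in cand:
--             if block.startswith(p, i):
--                 i += len(p)
--                 break
--         # rest of the line
--         while i < n and block[i] not in "\r\n":
--             out.append(block[i])
--             i += 1
--         # line terminator, normalised to '\n' (none after the last line)
--         if i < n:
--             i += 2 if block.startswith("\r\n", i) else 1
--             if i < n:
--                 out.append("\n")
--     return "".join(out)
-- ===== Notes on version B (the rewrite author's own statement) =====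
-- stated objective: alternative
-- what changed: B replaces A's splitlines + per-line prefix loop (lstrip/startswith/find/slice splicing) + join pipeline by a single left-to-right index scan over the raw block that copies whitespace, skips at most one prefix, copies the line body and normalises each line terminator as it goes.
import Mathlib
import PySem

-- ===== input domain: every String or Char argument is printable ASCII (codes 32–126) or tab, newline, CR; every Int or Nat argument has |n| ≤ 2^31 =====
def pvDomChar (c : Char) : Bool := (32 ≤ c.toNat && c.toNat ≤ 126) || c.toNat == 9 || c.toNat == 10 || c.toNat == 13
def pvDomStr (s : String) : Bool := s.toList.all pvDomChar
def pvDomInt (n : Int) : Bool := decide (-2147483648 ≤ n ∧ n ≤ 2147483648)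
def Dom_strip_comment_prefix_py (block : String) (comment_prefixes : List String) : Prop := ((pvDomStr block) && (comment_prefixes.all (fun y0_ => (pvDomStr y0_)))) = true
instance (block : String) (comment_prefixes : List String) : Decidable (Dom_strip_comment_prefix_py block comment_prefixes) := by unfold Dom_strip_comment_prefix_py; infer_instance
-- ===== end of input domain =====

-- B replaces A's splitlines + per-line prefix loop + join pipeline by a single
-- left-to-right scan over the raw block that copies whitespace, skips at most one
-- comment prefix, copies the line body and normalises each terminator to '\n'.

-- ===== PORT A =====
-- A's inner _strip_line: loop over prefixes; on a match, i = line.find(prefix),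
-- return line[:i] + line[i+len(prefix):].
def stripLineA (ln : List Char) : List String → List Char
  | [] => ln
  | p :: rest =>
    if PySem.Chars.startswith (PySem.Chars.lstrip ln) p.toList then
      let i := PySem.Chars.find ln p.toList
      PySem.Chars.slice ln none (some i) ++
        PySem.Chars.slice ln (some (i + p.toList.length)) none
    else stripLineA ln rest

def strip_comment_prefix_py (block : String) (comment_prefixes : List String) : String :=
  String.ofList
    (PySem.Chars.join ['\n']
      ((PySem.Chars.splitlines block.toList).map (fun l => stripLineA l comment_prefixes)))

-- ===== PORT B =====
-- Source B scans the raw block once with an index; here the index advance is the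
-- structural consumption of the char list.
def pvNotBrk (c : Char) : Bool := !(c == '\n' || c == '\r')      -- block[i] not in "\r\n"
def pvIsWs (c : Char) : Bool := pvNotBrk c && PySem.Chars.isspace c
def pvOkPrefix (p : String) : Bool :=                            -- "\n" not in p and "\r" not in p
  !PySem.Chars.isIn ['\n'] p.toList && !PySem.Chars.isIn ['\r'] p.toList

-- the 'for p in cand: if block.startswith(p, i): i += len(p); break' step
def lineAfterPrefix (cand : List String) (r1 : List Char) : List Char :=
  match cand.find? (fun p => PySem.Chars.startswith r1 p.toList) with
  | some p => r1.drop p.toList.length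
  | none => r1

theorem lineAfterPrefix_length_le (cand : List String) (r1 : List Char) :
    (lineAfterPrefix cand r1).length ≤ r1.length := by
  unfold lineAfterPrefix
  cases cand.find? (fun p => PySem.Chars.startswith r1 p.toList) <;> simp

-- one iteration of Source B's outer while loop, then recurse on the unread rest
def scanB (cand : List String) (s : List Char) : List Char :=
  if s.isEmpty then [] else                                      -- while i < n
    let ws := s.takeWhile pvIsWs
    let r2 := lineAfterPrefix cand (s.drop ws.length)
    let body := r2.takeWhile pvNotBrk
    match _h : r2.drop body.length with
    | [] => ws ++ body
    | '\r' :: '\n' :: rest => ws ++ body ++ (if rest.isEmpty then [] else '\n' :: scanB cand rest)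
    | _ :: rest => ws ++ body ++ (if rest.isEmpty then [] else '\n' :: scanB cand rest)
termination_by s.length
decreasing_by
  all_goals
    have h1 : r2.length ≤ s.length := le_trans (lineAfterPrefix_length_le _ _) (by simp)
    have h2 := congrArg List.length _h
    simp only [List.length_drop, List.length_cons] at h2
    omega

def strip_comment_prefix_py_alt (block : String) (comment_prefixes : List String) : String :=
  let cand := comment_prefixes.filter pvOkPrefix
  String.ofList (scanB cand block.toList)

-- ===== PRECONDITION & SPEC =====
def Spec_strip_comment_prefix_py (block : String) (comment_prefixes : List String) (out : String) : Prop := out = strip_comment_prefix_py_alt block comment_prefixes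
instance (block : String) (comment_prefixes : List String) (out : String) : Decidable (Spec_strip_comment_prefix_py block comment_prefixes out) := by unfold Spec_strip_comment_prefix_py; infer_instance

-- ===== CLAIM (what is proved, stated in full; the proofs are below) =====
def Claim_equal_strip_comment_prefix_py : Prop := ∀ (block : String) (comment_prefixes : List String), Dom_strip_comment_prefix_py block comment_prefixes → Spec_strip_comment_prefix_py block comment_prefixes (strip_comment_prefix_py block comment_prefixes)

-- ===== LEMMAS AND PROOFS =====

-- per-line reference form of the transformation (used only in the proofs)
def stripLineB (ln : List Char) (prefixes : List String) : List Char :=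
  let rest := PySem.Chars.lstrip ln
  let ws := ln.take (ln.length - rest.length)
  match prefixes.find? (fun p => PySem.Chars.startswith rest p.toList) with
  | none => ln
  | some p => ws ++ rest.drop p.toList.length

-- the line-break predicate splitlines uses, restricted to the ASCII domain
def pvIsB (c : Char) : Bool := c == '\n' || c == '\r'

-- splitlines, re-stated with the line decomposition scanB uses
def mySL (s : List Char) : List (List Char) :=
  if s.isEmpty then [] else
    let line := s.takeWhile pvNotBrk
    match _h : s.drop line.length with
    | [] => [line]
    | '\r' :: '\n' :: rest => line :: mySL rest
    | _ :: rest => line :: mySL rest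
termination_by s.length
decreasing_by
  all_goals
    have h1 : line.length ≤ s.length := by simpa using List.IsPrefix.length_le (List.takeWhile_prefix _)
    have h2 := congrArg List.length _h
    simp only [List.length_drop, List.length_cons] at h2
    omega

theorem dropWhile_eq_drop_length_takeWhile (p : Char → Bool) (l : List Char) :
    l.dropWhile p = l.drop (l.takeWhile p).length := by
  induction l with
  | nil => simp
  | cons a l ih => by_cases h : p a <;> simp [h, ih]

theorem takeWhile_mem_congr (p q : Char → Bool) (l : List Char) (h : ∀ a ∈ l, p a = q a) :
    l.takeWhile p = l.takeWhile q := by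
  induction l with
  | nil => rfl
  | cons a t ih => simp only [List.takeWhile_cons, h a (by simp)]; split <;> simp_all

-- --- small char/bool facts ---

theorem charEq_iff_toNat (c d : Char) : c = d ↔ c.toNat = d.toNat := by
  constructor
  · intro h; rw [h]
  · intro h; apply Char.ext; exact UInt32.toNat_inj.mp h

theorem pvNotBrk_false_iff (c : Char) : pvNotBrk c = false ↔ (c = '\n' ∨ c = '\r') := by
  simp only [pvNotBrk, Bool.not_eq_false', Bool.or_eq_true, beq_iff_eq]

theorem pvIsB_eq_not_pvNotBrk (c : Char) : pvIsB c = !pvNotBrk c := by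
  simp [pvIsB, pvNotBrk]

-- the exact break predicate of PySem.Chars.splitlines
def pvBigB (c : Char) : Bool :=
  decide (c.toNat = 10) || decide (c.toNat = 13) || decide (c.toNat = 11) || decide (c.toNat = 12) ||
    decide (c.toNat = 28) || decide (c.toNat = 29) || decide (c.toNat = 30) ||
    decide (c.toNat = 133) || decide (c.toNat = 8232) || decide (c.toNat = 8233)

theorem splitlines_eq_go (s : List Char) :
    PySem.Chars.splitlines s = PySem.Chars.splitlines.go pvBigB s [] [] := rfl

theorem pvBigB_eq_pvIsB_of_dom (c : Char) (h : pvDomChar c = true) : pvBigB c = pvIsB c := by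
  have h' : ((32 ≤ c.toNat ∧ c.toNat ≤ 126 ∨ c.toNat = 9) ∨ c.toNat = 10) ∨ c.toNat = 13 := by
    simpa [pvDomChar, Bool.or_eq_true, Bool.and_eq_true, decide_eq_true_eq] using h
  have h10 : (c = '\n') ↔ c.toNat = 10 := charEq_iff_toNat c '\n'
  have h13 : (c = '\r') ↔ c.toNat = 13 := charEq_iff_toNat c '\r'
  by_cases hc : c.toNat = 10 ∨ c.toNat = 13
  · rcases hc with hc | hc
    · have e := h10.mpr hc; subst e; decide
    · have e := h13.mpr hc; subst e; decide
  · push_neg at hc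
    have hB : pvBigB c = false := by
      simp only [pvBigB, Bool.or_eq_false_iff, decide_eq_false_iff_not]
      omega
    have e1 : (c == '\n') = false := by simp [h10, hc.1]
    have e2 : (c == '\r') = false := by simp [h13, hc.2]
    simp [pvIsB, hB, e1, e2]

-- --- generic facts about splitlines.go ---

theorem go_congr (isB1 isB2 : Char → Bool) (s cur : List Char) (acc : List (List Char))
    (h : ∀ c ∈ s, isB1 c = isB2 c) :
    PySem.Chars.splitlines.go isB1 s cur acc = PySem.Chars.splitlines.go isB2 s cur acc := by
  induction s, cur, acc using PySem.Chars.splitlines.go.induct (isB := isB1) with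
  | case1 cur acc hcur => rw [PySem.Chars.splitlines.go.eq_1, PySem.Chars.splitlines.go.eq_1]
  | case2 cur acc hcur => rw [PySem.Chars.splitlines.go.eq_1, PySem.Chars.splitlines.go.eq_1]
  | case3 rest cur acc ih =>
    rw [PySem.Chars.splitlines.go.eq_2, PySem.Chars.splitlines.go.eq_2]
    exact ih (fun c hc => h c (by simp [hc]))
  | case4 c rest cur acc hside hb ih =>
    rw [PySem.Chars.splitlines.go.eq_3 _ _ _ _ _ hside,
        PySem.Chars.splitlines.go.eq_3 _ _ _ _ _ hside]
    have hc := h c (by simp)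
    rw [hb] at hc
    rw [hb, ← hc]
    simp only [if_pos rfl]
    exact ih (fun c hc => h c (by simp [hc]))
  | case5 c rest cur acc hside hb ih =>
    rw [PySem.Chars.splitlines.go.eq_3 _ _ _ _ _ hside,
        PySem.Chars.splitlines.go.eq_3 _ _ _ _ _ hside]
    have hc := h c (by simp)
    have hb' : isB1 c = false := by cases hh : isB1 c; rfl; exact absurd hh hb
    rw [hb'] at hc
    rw [hb', ← hc]
    simp only [Bool.false_eq_true, if_false]
    exact ih (fun c hc => h c (by simp [hc]))

theorem go_acc (isB : Char → Bool) (s cur : List Char) (acc : List (List Char)) :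
    PySem.Chars.splitlines.go isB s cur acc
      = acc.reverse ++ PySem.Chars.splitlines.go isB s cur [] := by
  have H := PySem.Chars.splitlines.go.induct isB
    (motive := fun s cur _ => ∀ acc', PySem.Chars.splitlines.go isB s cur acc'
      = acc'.reverse ++ PySem.Chars.splitlines.go isB s cur [])
    ?c1 ?c2 ?c3 ?c4 ?c5 s cur []
  · exact H acc
  case c1 =>
    intro cur acc hcur acc'
    rw [PySem.Chars.splitlines.go.eq_1, PySem.Chars.splitlines.go.eq_1, if_pos hcur, if_pos hcur]
    simp
  case c2 =>
    intro cur acc hcur acc'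
    rw [PySem.Chars.splitlines.go.eq_1, PySem.Chars.splitlines.go.eq_1, if_neg hcur, if_neg hcur]
    simp
  case c3 =>
    intro rest cur acc ih acc'
    rw [PySem.Chars.splitlines.go.eq_2, PySem.Chars.splitlines.go.eq_2,
        ih (cur.reverse :: acc'), ih [cur.reverse]]
    simp
  case c4 =>
    intro c rest cur acc hside hb ih acc'
    rw [PySem.Chars.splitlines.go.eq_3 _ _ _ _ _ hside,
        PySem.Chars.splitlines.go.eq_3 _ _ _ _ _ hside, hb]
    simp only [if_pos rfl]
    rw [ih (cur.reverse :: acc'), ih [cur.reverse]]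
    simp
  case c5 =>
    intro c rest cur acc hside hb ih acc'
    have hb' : isB c = false := by cases hh : isB c; rfl; exact absurd hh hb
    rw [PySem.Chars.splitlines.go.eq_3 _ _ _ _ _ hside,
        PySem.Chars.splitlines.go.eq_3 _ _ _ _ _ hside, hb']
    simp only [Bool.false_eq_true, if_false]
    exact ih acc'

theorem go_safe (isB : Char → Bool) (hcr : isB '\r' = true) :
    ∀ body : List Char, (∀ c ∈ body, isB c = false) →
    ∀ (r cur : List Char) (acc : List (List Char)),
      PySem.Chars.splitlines.go isB (body ++ r) cur acc
        = PySem.Chars.splitlines.go isB r (body.reverse ++ cur) acc := by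
  intro body
  induction body with
  | nil => intro _ r cur acc; simp
  | cons c body' ih =>
    intro h r cur acc
    have hc : isB c = false := h c (by simp)
    have hside : ∀ rest1 : List Char, c = '\r' → body' ++ r = '\n' :: rest1 → False := by
      intro rest1 hcr' _
      rw [hcr', hcr] at hc
      exact absurd hc (by simp)
    rw [List.cons_append, PySem.Chars.splitlines.go.eq_3 _ _ _ _ _ hside, hc]
    simp only [Bool.false_eq_true, if_false]
    rw [ih (fun x hx => h x (by simp [hx])) r (c :: cur) acc]
    simp

-- --- case-unfolding lemmas for mySL and scanB ---

theorem mySL_nil : mySL [] = [] := by simp [mySL]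

theorem mySL_case_nil (s : List Char) (hs : s.isEmpty = false)
    (h : s.drop (s.takeWhile pvNotBrk).length = []) :
    mySL s = [s.takeWhile pvNotBrk] := by
  rw [mySL.eq_def, hs]
  simp only [Bool.false_eq_true, if_false]
  split <;> simp_all

theorem mySL_case_crlf (s rest : List Char) (hs : s.isEmpty = false)
    (h : s.drop (s.takeWhile pvNotBrk).length = '\r' :: '\n' :: rest) :
    mySL s = s.takeWhile pvNotBrk :: mySL rest := by
  rw [mySL.eq_def, hs]
  simp only [Bool.false_eq_true, if_false]
  split
  · simp_all
  · simp_all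
  · next c rest' hside h' =>
    rw [h] at h'
    injection h' with h1 h2
    exact (hside rest h1.symm h2.symm).elim

theorem mySL_case_one (s : List Char) (c : Char) (rest : List Char) (hs : s.isEmpty = false)
    (h : s.drop (s.takeWhile pvNotBrk).length = c :: rest)
    (hside : ∀ t : List Char, c = '\r' → rest = '\n' :: t → False) :
    mySL s = s.takeWhile pvNotBrk :: mySL rest := by
  rw [mySL.eq_def, hs]
  simp only [Bool.false_eq_true, if_false]
  split
  · simp_all
  · next rest' h' =>
    rw [h] at h'
    injection h' with h1 h2
    exact (hside rest' h1 h2).elim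
  · simp_all

theorem mySL_ne_nil (s : List Char) (hs : s.isEmpty = false) : mySL s ≠ [] := by
  rw [mySL.eq_def, hs]
  simp only [Bool.false_eq_true, if_false]
  split <;> simp

theorem scanB_nil (cand : List String) : scanB cand [] = [] := by simp [scanB]

theorem scanB_case_nil (cand : List String) (s : List Char) (hs : s.isEmpty = false)
    (h : (lineAfterPrefix cand (s.drop (s.takeWhile pvIsWs).length)).drop
          ((lineAfterPrefix cand (s.drop (s.takeWhile pvIsWs).length)).takeWhile pvNotBrk).length = []) :
    scanB cand s = s.takeWhile pvIsWs
      ++ (lineAfterPrefix cand (s.drop (s.takeWhile pvIsWs).length)).takeWhile pvNotBrk := by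
  rw [scanB.eq_def, hs]
  simp only [Bool.false_eq_true, if_false]
  split <;> simp_all

theorem scanB_case_crlf (cand : List String) (s rest : List Char) (hs : s.isEmpty = false)
    (h : (lineAfterPrefix cand (s.drop (s.takeWhile pvIsWs).length)).drop
          ((lineAfterPrefix cand (s.drop (s.takeWhile pvIsWs).length)).takeWhile pvNotBrk).length
        = '\r' :: '\n' :: rest) :
    scanB cand s = s.takeWhile pvIsWs
      ++ (lineAfterPrefix cand (s.drop (s.takeWhile pvIsWs).length)).takeWhile pvNotBrk
      ++ (if rest.isEmpty then [] else '\n' :: scanB cand rest) := by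
  rw [scanB.eq_def, hs]
  simp only [Bool.false_eq_true, if_false]
  split
  · simp_all
  · simp_all
  · next c rest' hside h' =>
    rw [h] at h'
    injection h' with h1 h2
    exact (hside rest h1.symm h2.symm).elim

theorem scanB_case_one (cand : List String) (s : List Char) (c : Char) (rest : List Char)
    (hs : s.isEmpty = false)
    (h : (lineAfterPrefix cand (s.drop (s.takeWhile pvIsWs).length)).drop
          ((lineAfterPrefix cand (s.drop (s.takeWhile pvIsWs).length)).takeWhile pvNotBrk).length
        = c :: rest)
    (hside : ∀ t : List Char, c = '\r' → rest = '\n' :: t → False) :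
    scanB cand s = s.takeWhile pvIsWs
      ++ (lineAfterPrefix cand (s.drop (s.takeWhile pvIsWs).length)).takeWhile pvNotBrk
      ++ (if rest.isEmpty then [] else '\n' :: scanB cand rest) := by
  rw [scanB.eq_def, hs]
  simp only [Bool.false_eq_true, if_false]
  split
  · simp_all
  · next rest' h' =>
    rw [h] at h'
    injection h' with h1 h2
    exact (hside rest' h1 h2).elim
  · simp_all

-- --- the A-side per-line function equals the reference per-line form ---

theorem find_eq_ws (ln p : List Char) (hp : p ≠ [])
    (h : PySem.Chars.startswith (PySem.Chars.lstrip ln) p = true) :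
    PySem.Chars.find ln p = ((ln.takeWhile PySem.Chars.isspace).length : Int) := by
  have hwle : (ln.takeWhile PySem.Chars.isspace).length ≤ ln.length :=
    (List.takeWhile_prefix _).length_le
  have hdrop : ln.drop (ln.takeWhile PySem.Chars.isspace).length
      = ln.dropWhile PySem.Chars.isspace := (dropWhile_eq_drop_length_takeWhile _ _).symm
  have hpre : p <+: ln.drop (ln.takeWhile PySem.Chars.isspace).length := by
    rw [hdrop]; exact (PySem.Chars.startswith_iff _ _).mp h
  have hinf : p <:+: ln := by
    rw [← PySem.Chars.isIn_iff_infix, ← PySem.Chars.exists_prefix_drop_iff_isIn]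
    exact ⟨_, hpre⟩
  have hnn : 0 ≤ PySem.Chars.find ln p := (PySem.Chars.find_nonneg_iff _ _).mpr hinf
  obtain ⟨hfound, hmin⟩ := PySem.Chars.find_spec hnn
  have hle : (PySem.Chars.find ln p).toNat ≤ (ln.takeWhile PySem.Chars.isspace).length := by
    by_contra hgt
    exact hmin _ (by omega) hpre
  have hfw : (PySem.Chars.find ln p).toNat = (ln.takeWhile PySem.Chars.isspace).length := by
    by_contra hne
    have hflt : (PySem.Chars.find ln p).toNat < (ln.takeWhile PySem.Chars.isspace).length := by
      omega
    obtain ⟨c, p', rfl⟩ : ∃ c p', p = c :: p' := by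
      cases p with | nil => exact absurd rfl hp | cons c p' => exact ⟨c, p', rfl⟩
    obtain ⟨r', hr'⟩ : ∃ r', ln.dropWhile PySem.Chars.isspace = c :: r' := by
      obtain ⟨t, ht⟩ := (PySem.Chars.startswith_iff _ _).mp h
      exact ⟨p' ++ t, by simpa [PySem.Chars.lstrip] using ht.symm⟩
    have hcns : PySem.Chars.isspace c = false := by
      have := List.head_dropWhile_not PySem.Chars.isspace (l := ln) (by rw [hr']; simp)
      simpa [hr'] using this
    obtain ⟨t2, ht2⟩ := hfound
    have hgf : ln[(PySem.Chars.find ln (c :: p')).toNat]? = some c := by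
      rw [← List.head?_drop, ← ht2]
      rfl
    have hflen : (PySem.Chars.find ln (c :: p')).toNat < ln.length := by omega
    have hsp : PySem.Chars.isspace (ln[(PySem.Chars.find ln (c :: p')).toNat]'hflen) = true := by
      have h1 : (ln.takeWhile PySem.Chars.isspace)[(PySem.Chars.find ln (c :: p')).toNat]'hflt
          ∈ ln.takeWhile PySem.Chars.isspace := List.getElem_mem _
      have h2 : (ln.takeWhile PySem.Chars.isspace)[(PySem.Chars.find ln (c :: p')).toNat]'hflt
          = ln[(PySem.Chars.find ln (c :: p')).toNat]'hflen :=
        (List.takeWhile_prefix _).getElem hflt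
      rw [← h2]
      exact List.mem_takeWhile_imp h1
    rw [List.getElem?_eq_getElem hflen] at hgf
    rw [Option.some_inj.mp hgf] at hsp
    rw [hcns] at hsp
    exact absurd hsp (by simp)
  omega

theorem take_ws (ln : List Char) :
    ln.take (ln.length - (PySem.Chars.lstrip ln).length) = ln.takeWhile PySem.Chars.isspace := by
  have h3 := congrArg List.length
    (List.takeWhile_append_dropWhile (p := PySem.Chars.isspace) (l := ln))
  simp only [List.length_append] at h3
  have h1 : ln.length - (PySem.Chars.lstrip ln).length
      = (ln.takeWhile PySem.Chars.isspace).length := by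
    simp only [PySem.Chars.lstrip]; omega
  rw [h1, ← List.prefix_iff_eq_take.mp (List.takeWhile_prefix _)]

theorem ws_append_rest (ln : List Char) :
    ln.take (ln.length - (PySem.Chars.lstrip ln).length) ++ PySem.Chars.lstrip ln = ln := by
  rw [take_ws]
  simp [PySem.Chars.lstrip]

theorem stripLine_eq (ln : List Char) (ps : List String) :
    stripLineA ln ps = stripLineB ln ps := by
  induction ps with
  | nil => simp [stripLineA, stripLineB]
  | cons p ps ih =>
    by_cases h : PySem.Chars.startswith (PySem.Chars.lstrip ln) p.toList = true
    · rw [stripLineA, if_pos h]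
      show _ = (match List.find? (fun q => PySem.Chars.startswith (PySem.Chars.lstrip ln) q.toList) (p :: ps) with
        | none => ln
        | some q => ln.take (ln.length - (PySem.Chars.lstrip ln).length) ++ (PySem.Chars.lstrip ln).drop q.toList.length)
      rw [List.find?_cons_of_pos (by simpa using h)]
      by_cases hp : p.toList = []
      · rw [hp]
        simp only [PySem.Chars.slice_eq_listSlice, List.length_nil]
        rw [PySem.Chars.find_nil]
        norm_num [PySem.List.slice_to, PySem.List.slice_from]
        have hp0 : p.length = 0 := by simpa using congrArg List.length hp
        rw [hp0]
        simp only [List.drop_zero]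
        exact (ws_append_rest ln).symm
      · rw [find_eq_ws ln p.toList hp h]
        simp only [PySem.Chars.slice_eq_listSlice]
        rw [PySem.List.slice_to _ (by positivity), PySem.List.slice_from _ (by positivity)]
        have h1 : ((((ln.takeWhile PySem.Chars.isspace).length : Int))).toNat
            = (ln.takeWhile PySem.Chars.isspace).length := by omega
        have h2 : ((((ln.takeWhile PySem.Chars.isspace).length : Int)) + (p.toList.length : Int)).toNat
            = (ln.takeWhile PySem.Chars.isspace).length + p.toList.length := by omega
        rw [h1, h2]
        have hws : ln.length - (PySem.Chars.lstrip ln).length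
            = (ln.takeWhile PySem.Chars.isspace).length := by
          have h3 := congrArg List.length
            (List.takeWhile_append_dropWhile (p := PySem.Chars.isspace) (l := ln))
          simp only [List.length_append] at h3
          simp only [PySem.Chars.lstrip]; omega
        rw [hws]
        congr 1
        rw [PySem.Chars.lstrip, dropWhile_eq_drop_length_takeWhile]
        rw [List.drop_drop]
    · rw [stripLineA, if_neg h, ih]
      show stripLineB ln ps = (match List.find? (fun q => PySem.Chars.startswith (PySem.Chars.lstrip ln) q.toList) (p :: ps) with
        | none => ln
        | some q => ln.take (ln.length - (PySem.Chars.lstrip ln).length) ++ (PySem.Chars.lstrip ln).drop q.toList.length)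
      rw [List.find?_cons_of_neg (by simpa using h)]
      rfl

-- --- generic list facts used to align the scanner with the per-line view ---

theorem find?_filter_eq (q pr : String → Bool) (l : List String) :
    (l.filter q).find? pr = l.find? (fun a => q a && pr a) := by
  induction l with
  | nil => rfl
  | cons a t ih => by_cases h : q a <;> by_cases h2 : pr a <;> simp [List.filter_cons, h, h2, ih]

theorem find?_mem_congr (p q : String → Bool) (l : List String) (h : ∀ a ∈ l, p a = q a) :
    l.find? p = l.find? q := by
  induction l with
  | nil => rfl
  | cons a t ih =>
    have ha := h a (by simp)
    rw [List.find?_cons, List.find?_cons, ha]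
    cases q a
    · exact ih (fun x hx => h x (by simp [hx]))
    · rfl

theorem takeWhile_append_stop (q : Char → Bool) (a b : List Char)
    (hb : b = [] ∨ ∃ c t, b = c :: t ∧ q c = false) :
    (a ++ b).takeWhile q = a.takeWhile q := by
  induction a with
  | nil =>
    rcases hb with rfl | ⟨c, t, rfl, hc⟩
    · rfl
    · simp [List.takeWhile_cons, hc]
  | cons x a' ih => cases hx : q x <;> simp [List.takeWhile_cons, hx, ih]

theorem prefix_append_of_brkfree (a t p : List Char) (c : Char)
    (hp : ∀ x ∈ p, pvNotBrk x = true) (hc : pvNotBrk c = false)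
    (h : p <+: a ++ c :: t) : p <+: a := by
  by_cases hlen : p.length ≤ a.length
  · have heq := List.prefix_iff_eq_take.mp h
    rw [List.take_append] at heq
    have h0 : p.length - a.length = 0 := by omega
    rw [h0, List.take_zero, List.append_nil] at heq
    exact heq ▸ List.take_prefix _ _
  · exfalso
    have heq := List.prefix_iff_eq_take.mp h
    rw [List.take_append] at heq
    obtain ⟨m, hm⟩ : ∃ m, p.length - a.length = m + 1 := ⟨p.length - a.length - 1, by omega⟩
    rw [hm] at heq
    have hcp : c ∈ p := by rw [heq]; simp
    rw [hp c hcp] at hc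
    exact Bool.noConfusion hc

theorem startswith_append_brk (a b p : List Char)
    (hp : ∀ x ∈ p, pvNotBrk x = true)
    (hb : b = [] ∨ ∃ c t, b = c :: t ∧ pvNotBrk c = false) :
    PySem.Chars.startswith (a ++ b) p = PySem.Chars.startswith a p := by
  rcases hb with rfl | ⟨c, t, rfl, hc⟩
  · rw [List.append_nil]
  · cases hs : PySem.Chars.startswith a p
    · cases hs2 : PySem.Chars.startswith (a ++ c :: t) p
      · rfl
      · exfalso
        have hpre := prefix_append_of_brkfree a t p c hp hc
          ((PySem.Chars.startswith_iff _ _).mp hs2)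
        rw [(PySem.Chars.startswith_iff _ _).mpr hpre] at hs
        exact Bool.noConfusion hs
    · exact (PySem.Chars.startswith_iff _ _).mpr
        (((PySem.Chars.startswith_iff _ _).mp hs).trans (List.prefix_append _ _))

theorem startswith_brkfull_false (a p : List Char)
    (ha : ∀ x ∈ a, pvNotBrk x = true) (hp : ∃ x ∈ p, pvNotBrk x = false) :
    PySem.Chars.startswith a p = false := by
  cases hs : PySem.Chars.startswith a p
  · rfl
  · obtain ⟨x, hxp, hx⟩ := hp
    have hxa : x ∈ a := ((PySem.Chars.startswith_iff _ _).mp hs).subset hxp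
    rw [ha x hxa] at hx
    exact Bool.noConfusion hx

theorem pvOkPrefix_true_chars (p : String) (h : pvOkPrefix p = true) :
    ∀ c ∈ p.toList, pvNotBrk c = true := by
  intro c hc
  simp only [pvOkPrefix, Bool.and_eq_true, Bool.not_eq_true'] at h
  obtain ⟨h1, h2⟩ := h
  cases hb : pvNotBrk c
  · exfalso
    rcases (pvNotBrk_false_iff c).mp hb with rfl | rfl
    · rw [(PySem.Chars.isIn_iff_infix _ _).mpr ((List.singleton_infix_iff _ _).mpr hc)] at h1
      exact Bool.noConfusion h1
    · rw [(PySem.Chars.isIn_iff_infix _ _).mpr ((List.singleton_infix_iff _ _).mpr hc)] at h2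
      exact Bool.noConfusion h2
  · rfl

theorem pvOkPrefix_false_char (p : String) (h : pvOkPrefix p = false) :
    ∃ c ∈ p.toList, pvNotBrk c = false := by
  have hor : PySem.Chars.isIn ['\n'] p.toList = true ∨ PySem.Chars.isIn ['\r'] p.toList = true := by
    cases h1 : PySem.Chars.isIn ['\n'] p.toList
    · cases h2 : PySem.Chars.isIn ['\r'] p.toList
      · exfalso
        rw [pvOkPrefix, h1, h2] at h
        exact Bool.noConfusion h
      · exact Or.inr rfl
    · exact Or.inl rfl
  rcases hor with h' | h'
  · exact ⟨'\n', (List.singleton_infix_iff _ _).mp ((PySem.Chars.isIn_iff_infix _ _).mp h'), by decide⟩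
  · exact ⟨'\r', (List.singleton_infix_iff _ _).mp ((PySem.Chars.isIn_iff_infix _ _).mp h'), by decide⟩

-- --- the scanner's line step, reconciled with the per-line reference ---

def pfxLen (ln : List Char) (ps : List String) : Nat :=
  match ps.find? (fun p => PySem.Chars.startswith (PySem.Chars.lstrip ln) p.toList) with
  | some p => p.toList.length
  | none => 0

theorem stripLineB_char (ln : List Char) (ps : List String) :
    stripLineB ln ps
      = ln.takeWhile PySem.Chars.isspace ++ (PySem.Chars.lstrip ln).drop (pfxLen ln ps) := by
  unfold stripLineB pfxLen
  cases hf : ps.find? (fun p => PySem.Chars.startswith (PySem.Chars.lstrip ln) p.toList)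
  · simp only [hf, List.drop_zero]
    rw [← take_ws ln]
    exact (ws_append_rest ln).symm
  · simp only [hf]
    rw [take_ws]

theorem lstrip_chars (ln : List Char) : ∀ c ∈ PySem.Chars.lstrip ln, c ∈ ln := by
  intro c hc
  exact (List.dropWhile_sublist _).subset hc

theorem ws_line (line r : List Char) (hline : ∀ c ∈ line, pvNotBrk c = true)
    (hr : r = [] ∨ ∃ c t, r = c :: t ∧ pvNotBrk c = false) :
    (line ++ r).takeWhile pvIsWs = line.takeWhile PySem.Chars.isspace := by
  rw [takeWhile_append_stop pvIsWs line r (by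
    rcases hr with rfl | ⟨c, t, rfl, hc⟩
    · exact Or.inl rfl
    · exact Or.inr ⟨c, t, rfl, by simp [pvIsWs, hc]⟩)]
  exact takeWhile_mem_congr _ _ line (fun c hc => by simp [pvIsWs, hline c hc])

theorem r1_eq (line r : List Char) (hline : ∀ c ∈ line, pvNotBrk c = true)
    (hr : r = [] ∨ ∃ c t, r = c :: t ∧ pvNotBrk c = false) :
    (line ++ r).drop ((line ++ r).takeWhile pvIsWs).length = PySem.Chars.lstrip line ++ r := by
  rw [ws_line line r hline hr]
  rw [List.drop_append_of_le_length (List.takeWhile_prefix _).length_le]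
  rw [PySem.Chars.lstrip, dropWhile_eq_drop_length_takeWhile]

theorem find?_line (line r : List Char) (ps : List String)
    (hline : ∀ c ∈ line, pvNotBrk c = true)
    (hr : r = [] ∨ ∃ c t, r = c :: t ∧ pvNotBrk c = false) :
    (ps.filter pvOkPrefix).find?
        (fun p => PySem.Chars.startswith (PySem.Chars.lstrip line ++ r) p.toList)
      = ps.find? (fun p => PySem.Chars.startswith (PySem.Chars.lstrip line) p.toList) := by
  rw [find?_filter_eq]
  apply find?_mem_congr
  intro p _
  have hlchars : ∀ x ∈ PySem.Chars.lstrip line, pvNotBrk x = true :=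
    fun x hx => hline x (lstrip_chars line x hx)
  cases hok : pvOkPrefix p
  · rw [startswith_brkfull_false _ _ hlchars (pvOkPrefix_false_char p hok)]
    simp
  · rw [startswith_append_brk _ _ _ (pvOkPrefix_true_chars p hok) hr]
    simp

theorem lineAfterPrefix_line (line r : List Char) (ps : List String)
    (hline : ∀ c ∈ line, pvNotBrk c = true)
    (hr : r = [] ∨ ∃ c t, r = c :: t ∧ pvNotBrk c = false) :
    lineAfterPrefix (ps.filter pvOkPrefix) (PySem.Chars.lstrip line ++ r)
      = (PySem.Chars.lstrip line).drop (pfxLen line ps) ++ r := by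
  unfold lineAfterPrefix
  rw [find?_line line r ps hline hr]
  unfold pfxLen
  cases hf : ps.find? (fun p => PySem.Chars.startswith (PySem.Chars.lstrip line) p.toList)
  · simp
  · next p =>
    have hpred := List.find?_some hf
    have hpre : p.toList <+: PySem.Chars.lstrip line := (PySem.Chars.startswith_iff _ _).mp hpred
    exact List.drop_append_of_le_length hpre.length_le

theorem body_line (line r : List Char) (ps : List String)
    (hline : ∀ c ∈ line, pvNotBrk c = true)
    (hr : r = [] ∨ ∃ c t, r = c :: t ∧ pvNotBrk c = false) :
    ((PySem.Chars.lstrip line).drop (pfxLen line ps) ++ r).takeWhile pvNotBrk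
      = (PySem.Chars.lstrip line).drop (pfxLen line ps) := by
  rw [takeWhile_append_stop _ _ _ hr]
  exact List.takeWhile_eq_self_iff.mpr
    (fun c hc => hline c (lstrip_chars line c ((List.drop_sublist _ _).subset hc)))


-- --- splitlines agrees with mySL on the ASCII domain ---

theorem SL_go : ∀ (n : Nat) (s : List Char), s.length ≤ n →
    PySem.Chars.splitlines.go pvIsB s [] [] = mySL s := by
  intro n
  induction n with
  | zero =>
    intro s hs
    have hnil : s = [] := List.eq_nil_of_length_eq_zero (by omega)
    subst hnil
    rw [PySem.Chars.splitlines.go.eq_1, mySL_nil]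
    simp
  | succ n ih =>
    intro s hs
    cases hE : s.isEmpty with
    | true =>
      have hnil : s = [] := by simpa [List.isEmpty_iff] using hE
      subst hnil
      rw [PySem.Chars.splitlines.go.eq_1, mySL_nil]
      simp
    | false =>
      have hne : s ≠ [] := by simpa [List.isEmpty_iff] using hE
      set line := s.takeWhile pvNotBrk with hlinedef
      set r := s.drop line.length with hrdef
      have hdw : r = s.dropWhile pvNotBrk := by
        rw [hrdef, ← dropWhile_eq_drop_length_takeWhile]
      have hsr : line ++ r = s := by
        rw [hdw, hlinedef]; exact List.takeWhile_append_dropWhile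
      have hline : ∀ c ∈ line, pvNotBrk c = true := fun c hc => List.mem_takeWhile_imp hc
      have hstep : PySem.Chars.splitlines.go pvIsB s [] []
          = PySem.Chars.splitlines.go pvIsB r line.reverse [] := by
        rw [← hsr, go_safe pvIsB (by decide) line
          (fun c hc => by rw [pvIsB_eq_not_pvNotBrk, hline c hc]; rfl) r [] []]
        rw [List.append_nil]
      have hlen := congrArg List.length hsr
      simp only [List.length_append] at hlen
      cases hr0 : r with
      | nil =>
        have hsl : s = line := by rw [← hsr, hr0, List.append_nil]
        have hlne : line ≠ [] := by rw [← hsl]; exact hne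
        rw [hstep, hr0, PySem.Chars.splitlines.go.eq_1]
        have hrevE : line.reverse.isEmpty = false := by simp [List.isEmpty_iff, hlne]
        rw [hrevE]
        simp only [Bool.false_eq_true, if_false]
        rw [mySL_case_nil s hE (by rw [← hrdef, hr0])]
        simp [← hlinedef]
      | cons c rest =>
        have hdc : s.dropWhile pvNotBrk = c :: rest := by rw [← hdw, hr0]
        have hc : pvNotBrk c = false := by
          have h2 := List.head_dropWhile_not pvNotBrk (l := s) (by rw [hdc]; simp)
          simpa [hdc] using h2
        have hrl := congrArg List.length hr0
        simp only [List.length_cons] at hrl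
        by_cases hcrlf : c = '\r' ∧ ∃ t2, rest = '\n' :: t2
        · obtain ⟨rfl, t2, rfl⟩ := hcrlf
          rw [hstep, hr0, PySem.Chars.splitlines.go.eq_2, go_acc]
          rw [ih t2 (by
            have := congrArg List.length hr0
            simp only [List.length_cons] at this
            omega)]
          rw [mySL_case_crlf s t2 hE (by rw [← hrdef, hr0])]
          simp [← hlinedef]
        · have hside : ∀ t2 : List Char, c = '\r' → rest = '\n' :: t2 → False :=
            fun t2 h1 h2 => hcrlf ⟨h1, t2, h2⟩
          rw [hstep, hr0, PySem.Chars.splitlines.go.eq_3 _ _ _ _ _ hside]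
          have hcB : pvIsB c = true := by rw [pvIsB_eq_not_pvNotBrk, hc]; rfl
          rw [hcB, if_pos rfl, go_acc]
          rw [ih rest (by omega)]
          rw [mySL_case_one s c rest hE (by rw [← hrdef, hr0]) hside]
          simp [← hlinedef]

theorem splitlines_dom (s : List Char) (h : ∀ c ∈ s, pvDomChar c = true) :
    PySem.Chars.splitlines s = mySL s := by
  rw [splitlines_eq_go,
    go_congr pvBigB pvIsB s [] [] (fun c hc => pvBigB_eq_pvIsB_of_dom c (h c hc)),
    SL_go s.length s le_rfl]

-- --- the scanner computes the join of the per-line transformation ---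

theorem scan_eq_join : ∀ (n : Nat) (s : List Char), s.length ≤ n → ∀ ps : List String,
    scanB (ps.filter pvOkPrefix) s
      = PySem.Chars.join ['\n'] ((mySL s).map (fun l => stripLineB l ps)) := by
  intro n
  induction n with
  | zero =>
    intro s hs ps
    have hnil : s = [] := List.eq_nil_of_length_eq_zero (by omega)
    subst hnil
    rw [scanB_nil, mySL_nil]
    rfl
  | succ n ih =>
    intro s hs ps
    cases hE : s.isEmpty with
    | true =>
      have hnil : s = [] := by simpa [List.isEmpty_iff] using hE
      subst hnil
      rw [scanB_nil, mySL_nil]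
      rfl
    | false =>
      set line := s.takeWhile pvNotBrk with hlinedef
      set r := s.drop line.length with hrdef
      have hdw : r = s.dropWhile pvNotBrk := by
        rw [hrdef, ← dropWhile_eq_drop_length_takeWhile]
      have hsr : line ++ r = s := by
        rw [hdw, hlinedef]; exact List.takeWhile_append_dropWhile
      have hline : ∀ c ∈ line, pvNotBrk c = true := fun c hc => List.mem_takeWhile_imp hc
      have hlen := congrArg List.length hsr
      simp only [List.length_append] at hlen
      have hr : r = [] ∨ ∃ c t, r = c :: t ∧ pvNotBrk c = false := by
        cases hr0 : r with
        | nil => exact Or.inl rfl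
        | cons c rest =>
          refine Or.inr ⟨c, rest, rfl, ?_⟩
          have hdc : s.dropWhile pvNotBrk = c :: rest := by rw [← hdw, hr0]
          have h2 := List.head_dropWhile_not pvNotBrk (l := s) (by rw [hdc]; simp)
          simpa [hdc] using h2
      have E1 : s.takeWhile pvIsWs = line.takeWhile PySem.Chars.isspace := by
        conv_lhs => rw [← hsr]
        exact ws_line line r hline hr
      have E2 : s.drop (s.takeWhile pvIsWs).length = PySem.Chars.lstrip line ++ r := by
        conv_lhs => rw [← hsr]
        exact r1_eq line r hline hr
      have E3 : lineAfterPrefix (ps.filter pvOkPrefix) (s.drop (s.takeWhile pvIsWs).length)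
          = (PySem.Chars.lstrip line).drop (pfxLen line ps) ++ r := by
        rw [E2, lineAfterPrefix_line line r ps hline hr]
      have E4 : (lineAfterPrefix (ps.filter pvOkPrefix)
            (s.drop (s.takeWhile pvIsWs).length)).takeWhile pvNotBrk
          = (PySem.Chars.lstrip line).drop (pfxLen line ps) := by
        rw [E3, body_line line r ps hline hr]
      have E5 : (lineAfterPrefix (ps.filter pvOkPrefix)
            (s.drop (s.takeWhile pvIsWs).length)).drop
            ((lineAfterPrefix (ps.filter pvOkPrefix)
              (s.drop (s.takeWhile pvIsWs).length)).takeWhile pvNotBrk).length = r := by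
        rw [E4, E3]
        exact List.drop_left
      cases hr0 : r with
      | nil =>
        rw [scanB_case_nil _ s hE (by rw [E5, hr0])]
        rw [mySL_case_nil s hE (by rw [← hrdef, hr0])]
        rw [E4, E1, List.map_cons, List.map_nil, PySem.Chars.join_singleton, stripLineB_char]
      | cons c rest =>
        have hrl := congrArg List.length hr0
        simp only [List.length_cons] at hrl
        by_cases hcrlf : c = '\r' ∧ ∃ t2, rest = '\n' :: t2
        · obtain ⟨rfl, t2, rfl⟩ := hcrlf
          have hrl2 := congrArg List.length hr0
          simp only [List.length_cons] at hrl2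
          rw [scanB_case_crlf _ s t2 hE (by rw [E5, hr0])]
          rw [mySL_case_crlf s t2 hE (by rw [← hrdef, hr0])]
          rw [E4, E1, List.map_cons]
          cases ht2 : t2.isEmpty with
          | true =>
            have hnil2 : t2 = [] := by simpa [List.isEmpty_iff] using ht2
            subst hnil2
            rw [mySL_nil, List.map_nil, PySem.Chars.join_singleton, stripLineB_char]
            simp [← hlinedef]
          | false =>
            obtain ⟨y, ys, hyy⟩ : ∃ y ys, mySL t2 = y :: ys := by
              cases hmy : mySL t2 with
              | nil => exact absurd hmy (mySL_ne_nil t2 ht2)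
              | cons y ys => exact ⟨y, ys, rfl⟩
            have iht := ih t2 (by omega) ps
            rw [hyy, List.map_cons] at iht
            rw [hyy, List.map_cons, PySem.Chars.join_cons_cons, ← iht, stripLineB_char]
            simp [← hlinedef, List.append_assoc]
        · have hside : ∀ t2 : List Char, c = '\r' → rest = '\n' :: t2 → False :=
            fun t2 h1 h2 => hcrlf ⟨h1, t2, h2⟩
          rw [scanB_case_one _ s c rest hE (by rw [E5, hr0]) hside]
          rw [mySL_case_one s c rest hE (by rw [← hrdef, hr0]) hside]
          rw [E4, E1, List.map_cons]
          cases hrest : rest.isEmpty with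
          | true =>
            have hnil2 : rest = [] := by simpa [List.isEmpty_iff] using hrest
            subst hnil2
            rw [mySL_nil, List.map_nil, PySem.Chars.join_singleton, stripLineB_char]
            simp [← hlinedef]
          | false =>
            obtain ⟨y, ys, hyy⟩ : ∃ y ys, mySL rest = y :: ys := by
              cases hmy : mySL rest with
              | nil => exact absurd hmy (mySL_ne_nil rest hrest)
              | cons y ys => exact ⟨y, ys, rfl⟩
            have iht := ih rest (by omega) ps
            rw [hyy, List.map_cons] at iht
            rw [hyy, List.map_cons, PySem.Chars.join_cons_cons, ← iht, stripLineB_char]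
            simp [← hlinedef, List.append_assoc]

-- ===== VERDICT (by name: the statement is the Claim_ definition above) =====
theorem strip_comment_prefix_py_spec : Claim_equal_strip_comment_prefix_py := by
  intro block ps hdom
  unfold Spec_strip_comment_prefix_py strip_comment_prefix_py strip_comment_prefix_py_alt
  have hchars : ∀ c ∈ block.toList, pvDomChar c = true := by
    have h1 : pvDomStr block = true := by
      unfold Dom_strip_comment_prefix_py at hdom
      exact ((Bool.and_eq_true _ _).mp hdom).1
    simpa [pvDomStr, List.all_eq_true] using h1
  rw [splitlines_dom block.toList hchars]
  rw [List.map_congr_left (fun l _ => stripLine_eq l ps)]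
  rw [← scan_eq_join block.toList.length block.toList le_rfl ps]
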